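-- pv_equiv track=rewrite | github.com/udayjayasanthosh/gfg | Difficulty: Easy/Coverage of all Zeros in a Binary Matrix/coverage-of-all-zeros-in-a-binary-matrix.py | findCoverage
-- ===== SOURCE A (Python) =====
-- def findCoverage(matrix):
-- 	# Code here
-- 	a=len(matrix)
-- 	b=len(matrix[0])
-- 	s=0
-- 	for i in range(a):
-- 	    for j in range(b):
-- 	        if(matrix[i][j]==0):
-- 	            if(i-1>=0):
-- 	                s+=matrix[i-1][j]
-- 	            if(j-1>=0):
-- 	                s+=matrix[i][j-1]
-- 	            if(i+1<a):
-- 	                s+=matrix[i+1][j]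
-- 	            if(j+1<b):
-- 	                s+=matrix[i][j+1]
-- 	return s
-- ===== SOURCE B (Python) =====
-- def findCoverage(matrix):
--     a = len(matrix)
--     b = len(matrix[0])
--     s = 0
--     for i in range(a):
--         row = matrix[i]
--         for j in range(b - 1):
--             l, r = row[j], row[j + 1]
--             s += (r if l == 0 else 0) + (l if r == 0 else 0)
--     for i in range(a - 1):
--         up, dn = matrix[i], matrix[i + 1]
--         for j in range(b):
--             u, d = up[j], dn[j]
--             s += (d if u == 0 else 0) + (u if d == 0 else 0)
--     return s
-- ===== Notes on version B (the rewrite author's own statement) =====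
-- stated objective: alternative
-- what changed: Instead of scanning every cell and, when it is zero, looking up its four neighbours, B iterates once over the horizontal and vertical adjacent pairs and adds each side's asymmetric contribution (neighbour value when the other side is 0), visiting every inter-cell boundary exactly once.
import Mathlib
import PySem

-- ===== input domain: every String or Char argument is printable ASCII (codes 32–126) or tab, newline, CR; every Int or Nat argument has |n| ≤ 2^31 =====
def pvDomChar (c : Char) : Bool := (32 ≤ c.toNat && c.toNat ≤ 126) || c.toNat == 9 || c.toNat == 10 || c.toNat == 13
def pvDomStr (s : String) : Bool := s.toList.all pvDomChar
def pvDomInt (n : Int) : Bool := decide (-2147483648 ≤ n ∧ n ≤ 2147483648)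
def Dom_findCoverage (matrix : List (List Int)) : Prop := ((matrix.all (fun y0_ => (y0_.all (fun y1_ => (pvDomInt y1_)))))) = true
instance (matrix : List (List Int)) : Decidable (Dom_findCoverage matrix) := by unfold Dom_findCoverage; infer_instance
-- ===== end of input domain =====

-- B counts each inter-cell boundary once (per-edge asymmetric contributions) instead of
-- four neighbour lookups per zero cell; same asymptotic cost, different traversal.

-- ===== PORT A =====
def findCoverage (matrix : List (List Int)) : Int :=
  let a : Int := matrix.length
  let b : Int := (matrix.getD 0 []).length
  (PySem.List.pyRange 0 a 1).foldl (fun s i =>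
    (PySem.List.pyRange 0 b 1).foldl (fun s j =>
      if PySem.List.pyGetD (PySem.List.pyGetD matrix i []) j 0 = 0 then
        let s1 := if 0 ≤ i - 1 then s + PySem.List.pyGetD (PySem.List.pyGetD matrix (i-1) []) j 0 else s
        let s2 := if 0 ≤ j - 1 then s1 + PySem.List.pyGetD (PySem.List.pyGetD matrix i []) (j-1) 0 else s1
        let s3 := if i + 1 < a then s2 + PySem.List.pyGetD (PySem.List.pyGetD matrix (i+1) []) j 0 else s2
        if j + 1 < b then s3 + PySem.List.pyGetD (PySem.List.pyGetD matrix i []) (j+1) 0 else s3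
      else s) s) 0

-- ===== PORT B =====
def findCoverage_alt (matrix : List (List Int)) : Int :=
  let a : Int := matrix.length
  let b : Int := (matrix.getD 0 []).length
  let sh := (PySem.List.pyRange 0 a 1).foldl (fun s i =>
    let row := PySem.List.pyGetD matrix i []
    (PySem.List.pyRange 0 (b-1) 1).foldl (fun s j =>
      let l := PySem.List.pyGetD row j 0
      let r := PySem.List.pyGetD row (j+1) 0
      s + ((if l = 0 then r else 0) + (if r = 0 then l else 0))) s) 0
  (PySem.List.pyRange 0 (a-1) 1).foldl (fun s i =>
    let up := PySem.List.pyGetD matrix i []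
    let dn := PySem.List.pyGetD matrix (i+1) []
    (PySem.List.pyRange 0 b 1).foldl (fun s j =>
      let u := PySem.List.pyGetD up j 0
      let d := PySem.List.pyGetD dn j 0
      s + ((if u = 0 then d else 0) + (if d = 0 then u else 0))) s) sh

-- ===== PRECONDITION & SPEC =====
-- Pre_ excludes exactly the inputs on which Python A raises IndexError: the empty matrix
-- (matrix[0]) and ragged matrices with a row shorter than the first row.
def Pre_findCoverage (matrix : List (List Int)) : Prop :=
  matrix ≠ [] ∧ ∀ row ∈ matrix, (matrix.getD 0 []).length ≤ row.length
instance (matrix : List (List Int)) : Decidable (Pre_findCoverage matrix) := by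
  unfold Pre_findCoverage; infer_instance
def pvWitness_findCoverage : List (List Int) := [[0, 1], [1, 0]]

def Spec_findCoverage (matrix : List (List Int)) (out : Int) : Prop := out = findCoverage_alt matrix
instance (matrix : List (List Int)) (out : Int) : Decidable (Spec_findCoverage matrix out) := by unfold Spec_findCoverage; infer_instance

-- ===== CLAIM (what is proved, stated in full; the proofs are below) =====
def Claim_equal_findCoverage : Prop := ∀ (matrix : List (List Int)), Dom_findCoverage matrix → Pre_findCoverage matrix → Spec_findCoverage matrix (findCoverage matrix)

-- ===== LEMMAS AND PROOFS =====

-- abbreviation for the matrix entry at (i, j), with the 0 / [] defaults of the ports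
def ent (matrix : List (List Int)) (i j : ℕ) : Int := (matrix.getD i []).getD j 0

-- A's per-cell contribution, with ℕ indices
def cellA (f : ℕ → ℕ → ℤ) (n m i j : ℕ) : ℤ :=
  if f i j = 0 then
    ((if 1 ≤ i then f (i-1) j else 0) + (if 1 ≤ j then f i (j-1) else 0) +
     (if i+1 < n then f (i+1) j else 0) + (if j+1 < m then f i (j+1) else 0))
  else 0

-- B's per-edge contributions
def pairH (f : ℕ → ℕ → ℤ) (i j : ℕ) : ℤ :=
  (if f i j = 0 then f i (j+1) else 0) + (if f i (j+1) = 0 then f i j else 0)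
def pairV (f : ℕ → ℕ → ℤ) (i j : ℕ) : ℤ :=
  (if f i j = 0 then f (i+1) j else 0) + (if f (i+1) j = 0 then f i j else 0)

def sumA (f : ℕ → ℕ → ℤ) (n m : ℕ) : ℤ :=
  ((List.range n).map (fun i => ((List.range m).map (cellA f n m i)).sum)).sum
def sumB (f : ℕ → ℕ → ℤ) (n m : ℕ) : ℤ :=
  ((List.range n).map (fun i => ((List.range (m-1)).map (pairH f i)).sum)).sum +
  ((List.range (n-1)).map (fun i => ((List.range m).map (pairV f i)).sum)).sum

-- a foldl whose body is "accumulate + F x" is init + sum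
theorem foldl_body_add {α : Type} (l : List α) (F : α → ℤ) (body : ℤ → α → ℤ)
    (h : ∀ s x, body s x = s + F x) (a : ℤ) :
    l.foldl body a = a + (l.map F).sum := by
  have hb : body = fun s x => s + F x := by funext s x; exact h s x
  rw [hb, PySem.List.foldl_add]

-- drop the last index of a range-sum when its term vanishes
theorem sum_range_shrink (n : ℕ) (u v : ℕ → ℤ)
    (h : ∀ k, k + 1 < n → u k = v k) (hl : ∀ k, k + 1 = n → u k = 0) :
    ((List.range n).map u).sum = ((List.range (n-1)).map v).sum := by
  cases n with
  | zero => simp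
  | succ k =>
    rw [List.range_succ]
    simp only [List.map_append, List.sum_append, List.map_cons, List.map_nil,
      List.sum_cons, List.sum_nil, Nat.add_sub_cancel]
    rw [hl k rfl]
    have : (List.range k).map u = (List.range k).map v := by
      apply List.map_congr_left
      intro x hx
      exact h x (by simpa using Nat.succ_lt_succ (List.mem_range.mp hx))
    rw [this]; ring

-- shift a range-sum down by one when the first term vanishes
theorem sum_range_shift (n : ℕ) (u v : ℕ → ℤ)
    (h : ∀ k, k + 1 < n → u (k+1) = v k) (h0 : 0 < n → u 0 = 0) :
    ((List.range n).map u).sum = ((List.range (n-1)).map v).sum := by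
  cases n with
  | zero => simp
  | succ k =>
    rw [List.range_succ_eq_map]
    simp only [List.map_cons, List.sum_cons, List.map_map, Nat.add_sub_cancel]
    rw [h0 (Nat.succ_pos k)]
    have : (List.range k).map (u ∘ Nat.succ) = (List.range k).map v := by
      apply List.map_congr_left
      intro x hx
      exact h x (by simpa using Nat.succ_lt_succ (List.mem_range.mp hx))
    rw [this]; ring

-- the per-edge double traversal computes the same total as the per-zero-cell scan
theorem sumA_eq_sumB (f : ℕ → ℕ → ℤ) (n m : ℕ) : sumA f n m = sumB f n m := by
  unfold sumA sumB
  have hsplit : ∀ i ∈ List.range n, ((List.range m).map (cellA f n m i)).sum =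
      (fun i => ((List.range m).map (fun j => if f i j = 0 ∧ 1 ≤ i then f (i-1) j else 0)).sum +
      (((List.range m).map (fun j => if f i j = 0 ∧ i+1 < n then f (i+1) j else 0)).sum +
       ((List.range (m-1)).map (pairH f i)).sum)) i := by
    intro i _
    have e : ∀ j ∈ List.range m, cellA f n m i j =
        (fun j => if f i j = 0 ∧ 1 ≤ i then f (i-1) j else 0) j +
        ((fun j => if f i j = 0 ∧ i+1 < n then f (i+1) j else 0) j +
         ((fun j => if f i j = 0 ∧ 1 ≤ j then f i (j-1) else 0) j +
          (fun j => if f i j = 0 ∧ j+1 < m then f i (j+1) else 0) j)) := by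
      intro j _
      unfold cellA
      by_cases h : f i j = 0 <;> simp [h] <;> ring
    rw [List.map_congr_left e, PySem.List.sum_map_add_int, PySem.List.sum_map_add_int,
      PySem.List.sum_map_add_int]
    have h2 : ((List.range m).map (fun j => if f i j = 0 ∧ 1 ≤ j then f i (j-1) else 0)).sum =
        ((List.range (m-1)).map (fun j => if f i (j+1) = 0 then f i j else 0)).sum := by
      apply sum_range_shift
      · intro k _; simp
      · intro _; simp
    have h4 : ((List.range m).map (fun j => if f i j = 0 ∧ j+1 < m then f i (j+1) else 0)).sum =
        ((List.range (m-1)).map (fun j => if f i j = 0 then f i (j+1) else 0)).sum := by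
      apply sum_range_shrink
      · intro k hk; simp [hk]
      · intro k hk; simp [hk]
    rw [h2, h4, ← PySem.List.sum_map_add_int]
    have : ∀ j ∈ List.range (m-1),
        (fun j => (if f i (j+1) = 0 then f i j else 0) + (if f i j = 0 then f i (j+1) else 0)) j
          = pairH f i j := by
      intro j _; unfold pairH; ring
    rw [List.map_congr_left this]
  rw [List.map_congr_left hsplit, PySem.List.sum_map_add_int, PySem.List.sum_map_add_int]
  have h1 : ((List.range n).map (fun i => ((List.range m).map
        (fun j => if f i j = 0 ∧ 1 ≤ i then f (i-1) j else 0)).sum)).sum =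
      ((List.range (n-1)).map (fun i => ((List.range m).map
        (fun j => if f (i+1) j = 0 then f i j else 0)).sum)).sum := by
    apply sum_range_shift
    · intro k _
      apply congrArg; apply List.map_congr_left; intro j _; simp
    · intro _; simp
  have h3 : ((List.range n).map (fun i => ((List.range m).map
        (fun j => if f i j = 0 ∧ i+1 < n then f (i+1) j else 0)).sum)).sum =
      ((List.range (n-1)).map (fun i => ((List.range m).map
        (fun j => if f i j = 0 then f (i+1) j else 0)).sum)).sum := by
    apply sum_range_shrink
    · intro k hk; apply congrArg; apply List.map_congr_left; intro j _; simp [hk]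
    · intro k hk; simp [hk]
  have hmerge : ((List.range (n-1)).map (fun i => ((List.range m).map
        (fun j => if f (i+1) j = 0 then f i j else 0)).sum)).sum +
      ((List.range (n-1)).map (fun i => ((List.range m).map
        (fun j => if f i j = 0 then f (i+1) j else 0)).sum)).sum =
      ((List.range (n-1)).map (fun i => ((List.range m).map (pairV f i)).sum)).sum := by
    rw [← PySem.List.sum_map_add_int]
    apply congrArg; apply List.map_congr_left; intro i _
    rw [← PySem.List.sum_map_add_int]
    apply congrArg; apply List.map_congr_left; intro j _
    unfold pairV; ring
  rw [h1, h3]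
  linarith [hmerge]

-- A's per-cell contribution with the ports' Int indexing
def cellI (matrix : List (List Int)) (n m i j : ℤ) : ℤ :=
  if PySem.List.pyGetD (PySem.List.pyGetD matrix i []) j 0 = 0 then
    ((if 0 ≤ i - 1 then PySem.List.pyGetD (PySem.List.pyGetD matrix (i-1) []) j 0 else 0)
     + (if 0 ≤ j - 1 then PySem.List.pyGetD (PySem.List.pyGetD matrix i []) (j-1) 0 else 0)
     + (if i+1 < n then PySem.List.pyGetD (PySem.List.pyGetD matrix (i+1) []) j 0 else 0)
     + (if j+1 < m then PySem.List.pyGetD (PySem.List.pyGetD matrix i []) (j+1) 0 else 0))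
  else 0

theorem cellI_cast (matrix : List (List Int)) (n m i j : ℕ) :
    cellI matrix (n:ℤ) (m:ℤ) (i:ℤ) (j:ℤ) = cellA (ent matrix) n m i j := by
  have q1 : ((0:ℤ) ≤ (i:ℤ) - 1) ↔ 1 ≤ i := by omega
  have q2 : ((0:ℤ) ≤ (j:ℤ) - 1) ↔ 1 ≤ j := by omega
  have q3 : ((i:ℤ) + 1 < (n:ℤ)) ↔ i + 1 < n := by omega
  have q4 : ((j:ℤ) + 1 < (m:ℤ)) ↔ j + 1 < m := by omega
  have k00 : PySem.List.pyGetD (PySem.List.pyGetD matrix (i:ℤ) []) (j:ℤ) 0 = ent matrix i j := by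
    simp only [PySem.List.pyGetD_natCast, ent]
  have kdn : PySem.List.pyGetD (PySem.List.pyGetD matrix ((i:ℤ)+1) []) (j:ℤ) 0
      = ent matrix (i+1) j := by
    rw [show ((i:ℤ)+1) = (((i+1:ℕ)):ℤ) from by push_cast; ring]
    simp only [PySem.List.pyGetD_natCast, ent]
  have kr : PySem.List.pyGetD (PySem.List.pyGetD matrix (i:ℤ) []) ((j:ℤ)+1) 0
      = ent matrix i (j+1) := by
    rw [show ((j:ℤ)+1) = (((j+1:ℕ)):ℤ) from by push_cast; ring]
    simp only [PySem.List.pyGetD_natCast, ent]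
  have kup : 1 ≤ i → PySem.List.pyGetD (PySem.List.pyGetD matrix ((i:ℤ)-1) []) (j:ℤ) 0
      = ent matrix (i-1) j := by
    intro h
    rw [show ((i:ℤ)-1) = (((i-1:ℕ)):ℤ) from by omega]
    simp only [PySem.List.pyGetD_natCast, ent]
  have kl : 1 ≤ j → PySem.List.pyGetD (PySem.List.pyGetD matrix (i:ℤ) []) ((j:ℤ)-1) 0
      = ent matrix i (j-1) := by
    intro h
    rw [show ((j:ℤ)-1) = (((j-1:ℕ)):ℤ) from by omega]
    simp only [PySem.List.pyGetD_natCast, ent]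
  unfold cellI cellA
  simp only [q1, q2, q3, q4, k00, kdn, kr]
  split_ifs
  all_goals (try rw [kup (by assumption)])
  all_goals (try rw [kl (by assumption)])
  all_goals rfl

theorem portA_eq_sumA (matrix : List (List Int)) :
    findCoverage matrix = sumA (ent matrix) matrix.length (matrix.getD 0 []).length := by
  have h : findCoverage matrix = 0 + ((PySem.List.pyRange 0 (matrix.length:ℤ) 1).map
      (fun i => ((PySem.List.pyRange 0 (((matrix.getD 0 []).length:ℕ):ℤ) 1).map
        (fun j => cellI matrix (matrix.length:ℤ) (((matrix.getD 0 []).length:ℕ):ℤ) i j)).sum)).sum := by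
    unfold findCoverage
    simp only []
    apply foldl_body_add
    intro s i
    apply foldl_body_add
    intro s j
    unfold cellI
    split_ifs <;> ring
  rw [h]
  simp only [PySem.List.pyRange_zero, Int.toNat_natCast, List.map_map, zero_add]
  unfold sumA
  refine congrArg List.sum (List.map_congr_left ?_)
  intro i _
  simp only [Function.comp_apply]
  refine congrArg List.sum (List.map_congr_left ?_)
  intro j _
  simp only [Function.comp_apply]
  exact cellI_cast matrix matrix.length (matrix.getD 0 []).length i j

theorem portB_eq_sumB (matrix : List (List Int)) :
    findCoverage_alt matrix = sumB (ent matrix) matrix.length (matrix.getD 0 []).length := by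
  unfold findCoverage_alt
  simp only []
  simp only [PySem.List.foldl_add]
  have tm : ((((matrix.getD 0 []).length:ℕ):ℤ) - 1).toNat = (matrix.getD 0 []).length - 1 := by
    omega
  have tn : (((matrix.length:ℕ):ℤ) - 1).toNat = matrix.length - 1 := by omega
  simp only [PySem.List.pyRange_zero, tm, tn, Int.toNat_natCast, List.map_map, zero_add]
  unfold sumB
  congr 1
  · refine congrArg List.sum (List.map_congr_left ?_)
    intro i _
    simp only [Function.comp_apply]
    refine congrArg List.sum (List.map_congr_left ?_)
    intro j _
    simp only [Function.comp_apply]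
    rw [show ((j:ℤ)+1) = (((j+1:ℕ)):ℤ) from by push_cast; ring]
    simp only [PySem.List.pyGetD_natCast, pairH, ent]
  · refine congrArg List.sum (List.map_congr_left ?_)
    intro i _
    simp only [Function.comp_apply]
    simp only [show ((i:ℤ)+1) = (((i+1:ℕ)):ℤ) from by push_cast; ring]
    refine congrArg List.sum (List.map_congr_left ?_)
    intro j _
    simp only [Function.comp_apply]
    simp only [PySem.List.pyGetD_natCast, pairV, ent]

-- ===== VERDICT (by name: the statement is the Claim_ definition above) =====
theorem findCoverage_spec : Claim_equal_findCoverage := by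
  intro matrix _ _
  unfold Spec_findCoverage
  rw [portA_eq_sumA, portB_eq_sumB, sumA_eq_sumB]
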